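-- pv_equiv track=rewrite | github.com/kkoga0219/home-decision-os | backend/app/connectors/suumo_search.py | _split_into_cards
-- ===== SOURCE A (Python) =====
-- def _split_into_cards(html: str, urls: list[str]) -> list[tuple[str, str]]:
--     """Split HTML into chunks, one per property listing."""
--     cards: list[tuple[str, str]] = []
--
--     # Find positions of each URL in the HTML
--     positions: list[tuple[int, str]] = []
--     for url in urls:
--         # Search for the URL or its relative form
--         rel_url = url.replace("https://suumo.jp", "")
--         pos = html.find(rel_url)
--         if pos == -1:
--             pos = html.find(url)
--         if pos >= 0:
--             positions.append((pos, url))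
--
--     positions.sort(key=lambda x: x[0])
--
--     # Extract chunks between consecutive URLs (with some look-back)
--     for i, (pos, url) in enumerate(positions):
--         start = max(0, pos - 2000)  # Look back for card start
--         if i + 1 < len(positions):
--             end = positions[i + 1][0]
--         else:
--             end = min(pos + 3000, len(html))
--         cards.append((url, html[start:end]))
--
--     return cards
-- ===== SOURCE B (Python) =====
-- def _insort(item, positions):
--     """Insert item into the position list kept sorted by first component (stable, bisect-right)."""
--     lo, hi = 0, len(positions)
--     while lo < hi:
--         mid = (lo + hi) // 2
--         if positions[mid][0] <= item[0]:
--             lo = mid + 1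
--         else:
--             hi = mid
--     positions.insert(lo, item)
--     return positions
--
--
-- def _split_into_cards(html, urls):
--     """Split HTML into chunks, one per property listing (online sorted insertion + zip-with-next)."""
--     positions = []
--     for url in urls:
--         rel_url = url.replace("https://suumo.jp", "")
--         pos = html.find(rel_url)
--         if pos < 0:
--             pos = html.find(url)
--         if pos >= 0:
--             positions = _insort((pos, url), positions)
--     nexts = [p for p, _ in positions[1:]] + [None]
--     return [
--         (url, html[max(0, pos - 2000):(nxt if nxt is not None else min(pos + 3000, len(html)))])
--         for (pos, url), nxt in zip(positions, nexts)
--     ]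
-- ===== Notes on version B (the rewrite author's own statement) =====
-- stated objective: alternative
-- what changed: B maintains the position list sorted at all times by binary-search insertion as matches are found (no sort call), and builds the cards by zipping every position with its successor instead of A's enumerate loop that indexes positions[i+1].
import Mathlib
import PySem

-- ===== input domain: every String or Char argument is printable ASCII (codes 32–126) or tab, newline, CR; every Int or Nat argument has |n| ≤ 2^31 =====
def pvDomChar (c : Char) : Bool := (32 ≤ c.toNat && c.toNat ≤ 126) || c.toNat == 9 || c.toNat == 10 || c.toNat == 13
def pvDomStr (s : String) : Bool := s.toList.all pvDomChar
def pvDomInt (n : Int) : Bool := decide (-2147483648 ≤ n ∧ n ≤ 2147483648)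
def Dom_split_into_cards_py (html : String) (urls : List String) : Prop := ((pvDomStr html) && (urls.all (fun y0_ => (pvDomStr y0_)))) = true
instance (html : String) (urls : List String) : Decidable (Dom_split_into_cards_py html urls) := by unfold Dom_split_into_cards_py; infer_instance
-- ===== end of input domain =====

-- B replaces A's append-then-sort with binary-search insertion into an always-sorted list, and
-- builds the cards by zipping positions with their successors instead of indexing positions[i+1]
-- in an enumerate loop (objective: alternative, not faster).

-- ===== PORT A =====
def split_into_cards_py (html : String) (urls : List String) : List (String × String) :=
  let positions0 : List (Int × String) := urls.foldl (fun positions url =>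
    let rel_url := PySem.Str.replace url "https://suumo.jp" ""
    let pos := PySem.Str.find html rel_url
    let pos := if pos = -1 then PySem.Str.find html url else pos
    if pos ≥ 0 then positions ++ [(pos, url)] else positions) []
  let positions := PySem.List.sorted positions0 (fun x => x.1)
  (PySem.List.enumerate positions).foldl (fun cards ipu =>
    let i := ipu.1
    let pos := ipu.2.1
    let url := ipu.2.2
    let start := max 0 (pos - 2000)
    let stop := if i + 1 < PySem.List.len positions then
        ((PySem.List.pyGet? positions (i + 1)).getD (0, "")).1
      else min (pos + 3000) (PySem.Str.len html)
    cards ++ [(url, PySem.Str.slice html (some start) (some stop))]) []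

-- ===== PORT B =====
-- the while loop of Source B's _insort: bisect-right on the first component
def pvBisect (positions : List (Int × String)) (p : Int) (lo hi : Nat) : Nat :=
  if h : lo < hi then
    let mid := (lo + hi) / 2
    if ((PySem.List.pyGet? positions (mid : Int)).getD (0, "")).1 ≤ p then
      pvBisect positions p (mid + 1) hi
    else
      pvBisect positions p lo mid
  else lo
termination_by hi - lo
decreasing_by all_goals omega

-- Source B's _insort: positions.insert(lo, item)
def pvInsort (item : Int × String) (positions : List (Int × String)) : List (Int × String) :=
  let lo := pvBisect positions item.1 0 positions.length
  PySem.List.insert positions (lo : Int) item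

def split_into_cards_py_alt (html : String) (urls : List String) : List (String × String) :=
  let positions : List (Int × String) := urls.foldl (fun positions url =>
    let rel_url := PySem.Str.replace url "https://suumo.jp" ""
    let pos := PySem.Str.find html rel_url
    let pos := if pos < 0 then PySem.Str.find html url else pos
    if pos ≥ 0 then pvInsort (pos, url) positions else positions) []
  let nexts : List (Option Int) :=
    (PySem.List.slice positions (some 1) none).map (fun p => some p.1) ++ [none]
  (positions.zip nexts).map (fun pn =>
    let pos := pn.1.1
    let stop := match pn.2 with
      | some q => q
      | none => min (pos + 3000) (PySem.Str.len html)
    (pn.1.2, PySem.Str.slice html (some (max 0 (pos - 2000))) (some stop)))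

-- ===== PRECONDITION & SPEC =====
def Spec_split_into_cards_py (html : String) (urls : List String) (out : List (String × String)) : Prop := out = split_into_cards_py_alt html urls
instance (html : String) (urls : List String) (out : List (String × String)) : Decidable (Spec_split_into_cards_py html urls out) := by unfold Spec_split_into_cards_py; infer_instance

-- ===== CLAIM (what is proved, stated in full; the proofs are below) =====
def Claim_equal_split_into_cards_py : Prop := ∀ (html : String) (urls : List String), Dom_split_into_cards_py html urls → Spec_split_into_cards_py html urls (split_into_cards_py html urls)

-- ===== LEMMAS AND PROOFS =====

-- the candidate an url contributes (A's phrasing)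
def pvCand (html url : String) : Option (Int × String) :=
  let rel_url := PySem.Str.replace url "https://suumo.jp" ""
  let pos := PySem.Str.find html rel_url
  let pos := if pos = -1 then PySem.Str.find html url else pos
  if pos ≥ 0 then some (pos, url) else none

-- the insertion point found by a linear left scan
def pvInsIdx (p : Int) : List (Int × String) → Nat
  | [] => 0
  | y :: ys => if y.1 ≤ p then pvInsIdx p ys + 1 else 0

-- A's and B's position selections coincide (< 0 test vs = -1 test; find never returns below -1)
theorem pvPos_eq (html sub url : String) :
    (if PySem.Str.find html sub < 0 then PySem.Str.find html url else PySem.Str.find html sub)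
    = (if PySem.Str.find html sub = -1 then PySem.Str.find html url
       else PySem.Str.find html sub) := by
  by_cases h : PySem.Str.find html sub = -1
  · rw [if_pos h, if_pos (by omega)]
  · have h0 : 0 ≤ PySem.Str.find html sub :=
      (PySem.Str.find_nonneg_iff _ _).mpr ((PySem.Str.find_ne_neg_one_iff _ _).mp h)
    rw [if_neg h, if_neg (by omega)]

theorem pvInsIdx_le (p : Int) (l : List (Int × String)) : pvInsIdx p l ≤ l.length := by
  induction l with
  | nil => simp [pvInsIdx]
  | cons y ys ih =>
    simp only [pvInsIdx]
    split_ifs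
    · simp only [List.length_cons]; omega
    · omega

-- characterization of the linear insertion point
theorem pvInsIdx_eq (p : Int) (l : List (Int × String)) (k : Nat) (hk : k ≤ l.length)
    (h1 : ∀ i (h : i < l.length), i < k → l[i].1 ≤ p)
    (h2 : ∀ i (h : i < l.length), k ≤ i → p < l[i].1) :
    pvInsIdx p l = k := by
  induction l generalizing k with
  | nil => simp at hk; simp [pvInsIdx, hk]
  | cons y ys ih =>
    cases k with
    | zero =>
      have := h2 0 (by simp) (by omega)
      simp only [List.getElem_cons_zero] at this
      simp [pvInsIdx, show ¬ y.1 ≤ p by omega]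
    | succ j =>
      have hy : y.1 ≤ p := by
        have := h1 0 (by simp) (by omega)
        simpa using this
      simp only [pvInsIdx, if_pos hy]
      have : pvInsIdx p ys = j := by
        apply ih j (by simp at hk; omega)
        · intro i h hij
          have := h1 (i + 1) (by simp; omega) (by omega)
          simpa using this
        · intro i h hij
          have := h2 (i + 1) (by simp; omega) (by omega)
          simpa using this
      omega

-- sorted lists are getElem-monotone on the key
theorem pvSorted_mono (l : List (Int × String)) (hs : l.Pairwise (fun a b => a.1 ≤ b.1))
    (i j : Nat) (hij : i ≤ j) (hj : j < l.length) :
    (l[i]'(Nat.lt_of_le_of_lt hij hj)).1 ≤ l[j].1 := by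
  rcases Nat.eq_or_lt_of_le hij with rfl | h
  · exact le_refl _
  · exact (List.pairwise_iff_getElem.mp hs) i j (Nat.lt_of_le_of_lt hij hj) hj h

-- the binary search finds the linear insertion point on a sorted list
theorem pvBisect_loop (p : Int) (l : List (Int × String))
    (hs : l.Pairwise (fun a b => a.1 ≤ b.1)) (lo hi : Nat)
    (hlohi : lo ≤ hi) (hhi : hi ≤ l.length)
    (h1 : ∀ i (h : i < l.length), i < lo → l[i].1 ≤ p)
    (h2 : ∀ i (h : i < l.length), hi ≤ i → p < l[i].1) :
    pvBisect l p lo hi = pvInsIdx p l := by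
  rw [pvBisect]
  split
  · next h =>
    have hmidlt : (lo + hi) / 2 < l.length := by omega
    show (if ((PySem.List.pyGet? l (((lo + hi) / 2 : Nat) : Int)).getD (0, "")).1 ≤ p then
        pvBisect l p ((lo + hi) / 2 + 1) hi else pvBisect l p lo ((lo + hi) / 2)) = pvInsIdx p l
    rw [PySem.List.pyGet?_natCast, List.getElem?_eq_getElem hmidlt]
    simp only [Option.getD_some]
    split
    · next hle =>
      exact pvBisect_loop p l hs ((lo + hi) / 2 + 1) hi (by omega) hhi
        (fun i hilen hi' => le_trans (pvSorted_mono l hs i ((lo + hi) / 2) (by omega) hmidlt) hle)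
        h2
    · next hgt =>
      exact pvBisect_loop p l hs lo ((lo + hi) / 2) (by omega) (by omega)
        h1
        (fun i hilen hi' => lt_of_lt_of_le (by omega)
          (pvSorted_mono l hs ((lo + hi) / 2) i hi' hilen))
  · next h =>
    have : lo = hi := by omega
    subst this
    exact (pvInsIdx_eq p l lo (by omega) h1 (fun i hh hge => h2 i hh hge)).symm
termination_by hi - lo
decreasing_by all_goals omega

-- pvInsort in take/drop form (on a sorted list)
theorem pvInsort_take_drop (item : Int × String) (l : List (Int × String))
    (hs : l.Pairwise (fun a b => a.1 ≤ b.1)) :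
    pvInsort item l = l.take (pvInsIdx item.1 l) ++ item :: l.drop (pvInsIdx item.1 l) := by
  have hb : pvBisect l item.1 0 l.length = pvInsIdx item.1 l :=
    pvBisect_loop item.1 l hs 0 l.length (by omega) (le_refl _)
      (by omega) (by intro i h hge; omega)
  show PySem.List.insert l ((pvBisect l item.1 0 l.length : Nat) : Int) item = _
  rw [hb, PySem.List.insert_natCast l (pvInsIdx item.1 l) item (pvInsIdx_le item.1 l)]

-- the linear insertion point realizes PySem.List.insertBy
theorem pvLinear_insertBy (item : Int × String) (l : List (Int × String)) :
    l.take (pvInsIdx item.1 l) ++ item :: l.drop (pvInsIdx item.1 l)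
    = PySem.List.insertBy (fun a b => decide (a.1 < b.1)) item l := by
  induction l with
  | nil => simp [pvInsIdx, PySem.List.insertBy]
  | cons y ys ih =>
    by_cases h : y.1 ≤ item.1
    · have hlt : ¬ item.1 < y.1 := by omega
      simp only [pvInsIdx, if_pos h, List.take_succ_cons, List.drop_succ_cons,
        List.cons_append]
      simp [ih, PySem.List.insertBy, hlt]
    · have hlt : item.1 < y.1 := by omega
      simp [pvInsIdx, if_neg h, PySem.List.insertBy, hlt]

-- pvInsort is insertBy on a sorted list
theorem pvInsort_eq (item : Int × String) (l : List (Int × String))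
    (hs : l.Pairwise (fun a b => a.1 ≤ b.1)) :
    pvInsort item l = PySem.List.insertBy (fun a b => decide (a.1 < b.1)) item l := by
  rw [pvInsort_take_drop item l hs, pvLinear_insertBy]

-- insertBy preserves sortedness
theorem pvInsertBy_pairwise (x : Int × String) (l : List (Int × String))
    (hs : l.Pairwise (fun a b => a.1 ≤ b.1)) :
    (PySem.List.insertBy (fun a b => decide (a.1 < b.1)) x l).Pairwise (fun a b => a.1 ≤ b.1) := by
  induction l with
  | nil => simp [PySem.List.insertBy]
  | cons y ys ih =>
    rw [List.pairwise_cons] at hs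
    by_cases h : x.1 < y.1
    · simp only [PySem.List.insertBy, h, decide_true, if_true]
      refine List.Pairwise.cons ?_ (List.Pairwise.cons hs.1 hs.2)
      intro b hb
      rcases List.mem_cons.mp hb with rfl | hb
      · omega
      · exact le_trans (by omega) (hs.1 b hb)
    · simp only [PySem.List.insertBy, h, decide_false, Bool.false_eq_true, if_false]
      refine List.Pairwise.cons ?_ (ih hs.2)
      intro b hb
      rcases (PySem.List.mem_insertBy _ _ _ _).mp hb with rfl | hb
      · omega
      · exact hs.1 b hb

-- a loop that appends one optional element per step is filterMap
theorem pvFoldAppendGen {α β : Type} (f : β → Option α) (step : List α → β → List α)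
    (hstep : ∀ a b, step a b = (f b).elim a (fun x => a ++ [x]))
    (l : List β) (acc : List α) :
    l.foldl step acc = acc ++ l.filterMap f := by
  induction l generalizing acc with
  | nil => simp
  | cons b bs ih =>
    rw [List.foldl_cons, hstep, List.filterMap_cons]
    cases f b <;> simp [ih]

-- A's step is the optional-append step of pvCand
theorem pvStepA (html : String) :
    (fun (positions : List (Int × String)) (url : String) =>
      let rel_url := PySem.Str.replace url "https://suumo.jp" ""
      let pos := PySem.Str.find html rel_url
      let pos := if pos = -1 then PySem.Str.find html url else pos
      if pos ≥ 0 then positions ++ [(pos, url)] else positions)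
    = fun a u => (pvCand html u).elim a (fun x => a ++ [x]) := by
  funext a u
  simp only [pvCand]
  split_ifs with h <;> rfl

-- B's step, applied, is the optional-insertBy step of pvCand (on a sorted accumulator)
theorem pvStepB_ap (html : String) (a : List (Int × String)) (u : String)
    (hacc : a.Pairwise (fun x y => x.1 ≤ y.1)) :
    (if (if PySem.Str.find html (PySem.Str.replace u "https://suumo.jp" "") < 0 then
          PySem.Str.find html u
        else PySem.Str.find html (PySem.Str.replace u "https://suumo.jp" "")) ≥ 0 then
        pvInsort ((if PySem.Str.find html (PySem.Str.replace u "https://suumo.jp" "") < 0 then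
          PySem.Str.find html u
        else PySem.Str.find html (PySem.Str.replace u "https://suumo.jp" "")), u) a
      else a)
    = (pvCand html u).elim a
        (fun x => PySem.List.insertBy (fun p q => decide (p.1 < q.1)) x a) := by
  rw [pvPos_eq html (PySem.Str.replace u "https://suumo.jp" "") u]
  simp only [pvCand]
  split_ifs <;> first | rfl | exact pvInsort_eq _ a hacc

-- a loop that inserts one optional element per step, preserving an invariant, is a foldl over filterMap
theorem pvFoldInsGen {α β : Type} (R : α → α → Prop) (f : β → Option α) (ins : α → List α → List α)
    (step : List α → β → List α)
    (hstep : ∀ a b, a.Pairwise R → step a b = (f b).elim a (fun x => ins x a))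
    (hins : ∀ x a, a.Pairwise R → (ins x a).Pairwise R)
    (l : List β) (acc : List α) (hacc : acc.Pairwise R) :
    l.foldl step acc = (l.filterMap f).foldl (fun a x => ins x a) acc := by
  induction l generalizing acc with
  | nil => rfl
  | cons b bs ih =>
    rw [List.foldl_cons, hstep acc b hacc, List.filterMap_cons]
    cases f b with
    | none => exact ih acc hacc
    | some x => exact ih (ins x acc) (hins x acc hacc)

-- B's loop keeps the list sorted and performs the insertBy fold over the candidates
theorem pvFoldB (html : String) (urls : List String) (acc : List (Int × String))
    (hacc : acc.Pairwise (fun a b => a.1 ≤ b.1)) :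
    urls.foldl (fun positions url =>
      let rel_url := PySem.Str.replace url "https://suumo.jp" ""
      let pos := PySem.Str.find html rel_url
      let pos := if pos < 0 then PySem.Str.find html url else pos
      if pos ≥ 0 then pvInsort (pos, url) positions else positions) acc
    = (urls.filterMap (pvCand html)).foldl
        (fun a x => PySem.List.insertBy (fun a b => decide (a.1 < b.1)) x a) acc :=
  pvFoldInsGen (fun a b => a.1 ≤ b.1) (pvCand html)
    (fun x a => PySem.List.insertBy (fun p q => decide (p.1 < q.1)) x a) _
    (fun a b hb => pvStepB_ap html a b hb)
    (fun x a ha => pvInsertBy_pairwise x a ha) urls acc hacc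

-- a foldl that appends one element per step is a map
theorem pvFoldl_append_map {α β : Type} (l : List α) (f : α → β) (acc : List β) :
    l.foldl (fun a x => a ++ [f x]) acc = acc ++ l.map f := by
  induction l generalizing acc with
  | nil => simp
  | cons x xs ih => simp [ih]

-- enumerate element

theorem pvEnum_getElem {α : Type} (xs : List α) (s : Int) (i : Nat)
    (h : i < (PySem.List.enumerate xs s).length) :
    (PySem.List.enumerate xs s)[i] = (s + i, xs[i]'(by simpa [PySem.List.length_enumerate] using h)) := by
  induction xs generalizing s i with
  | nil => simp at h
  | cons x t ih =>
    cases i with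
    | zero => simp [PySem.List.enumerate]
    | succ j =>
      have hj : j < (PySem.List.enumerate t (s + 1)).length := by
        simpa [PySem.List.length_enumerate] using Nat.lt_of_succ_lt_succ (by simpa [PySem.List.length_enumerate] using h)
      show (PySem.List.enumerate t (s + 1))[j] = _
      rw [ih (s + 1) j hj]
      congr 1
      push_cast
      ring

-- the card-building stage: A's enumerate/index loop equals B's zip-with-next map
theorem pvStage2 (html : String) (P : List (Int × String)) :
    (PySem.List.enumerate P).foldl (fun cards ipu =>
      let i := ipu.1
      let pos := ipu.2.1
      let url := ipu.2.2
      let start := max 0 (pos - 2000)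
      let stop := if i + 1 < PySem.List.len P then
          ((PySem.List.pyGet? P (i + 1)).getD (0, "")).1
        else min (pos + 3000) (PySem.Str.len html)
      cards ++ [(url, PySem.Str.slice html (some start) (some stop))]) []
    = (P.zip ((PySem.List.slice P (some 1) none).map (fun p => some p.1) ++ [none])).map (fun pn =>
        let pos := pn.1.1
        let stop := match pn.2 with
          | some q => q
          | none => min (pos + 3000) (PySem.Str.len html)
        (pn.1.2, PySem.Str.slice html (some (max 0 (pos - 2000))) (some stop))) := by
  rw [pvFoldl_append_map, List.nil_append, PySem.List.slice_from_one]
  apply List.ext_getElem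
  · simp [PySem.List.length_enumerate]
    omega
  · intro j h1 h2
    have hjP : j < P.length := by simpa using h1
    rw [List.getElem_map, List.getElem_map, List.getElem_zip, pvEnum_getElem P 0 j (by simpa [PySem.List.length_enumerate] using hjP)]
    simp only [PySem.List.len_eq]
    by_cases hj : j + 1 < P.length
    · have hcond : (0 : Int) + (j : Int) + 1 < (P.length : Int) := by omega
      rw [if_pos hcond]
      have hcast : ((0 : Int) + (j : Int) + 1) = ((j + 1 : Nat) : Int) := by push_cast; ring
      rw [hcast, PySem.List.pyGet?_natCast, List.getElem?_eq_getElem (by omega)]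
      have hleft : j < (P.tail.map (fun p => some p.1)).length := by
        simp; omega
      rw [List.getElem_append_left hleft, List.getElem_map, List.getElem_tail]
      rfl
    · have hcond : ¬ ((0 : Int) + (j : Int) + 1 < (P.length : Int)) := by omega
      rw [if_neg hcond]
      have hge : (P.tail.map (fun p => some p.1)).length ≤ j := by
        simp; omega
      rw [List.getElem_append_right hge]
      simp

-- ===== VERDICT (by name: the statement is the Claim_ definition above) =====
theorem split_into_cards_py_spec : Claim_equal_split_into_cards_py := by
  intro html urls _
  show split_into_cards_py html urls = split_into_cards_py_alt html urls
  unfold split_into_cards_py split_into_cards_py_alt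
  rw [pvStepA html]
  rw [pvFoldAppendGen (pvCand html) _ (fun _ _ => rfl) urls []]
  rw [pvFoldB html urls [] List.Pairwise.nil]
  rw [List.nil_append]
  simp only [PySem.List.sorted_eq_foldl_insertBy]
  exact pvStage2 html _
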